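-- pv_equiv track=rewrite | github.com/xshirl/ik-problems | distinctSubsets.py | get_distinct_subsets
-- ===== SOURCE A (Python) =====
-- def get_distinct_subsets(str):
--     str = sorted(str)
--     result = []
--     def helper(slate, n):
--         result.append(slate)
--         if n == len(str):
--             return
--         unique = {}
--
--         for index in range(n, len(str)):
--             if str[index] not in unique:
--                 unique[str[index]] = 1
--                 helper(slate + str[index], index+1)
--
--     helper("", 0)
--     return result
-- ===== SOURCE B (Python) =====
-- def get_distinct_subsets(str):
--     str = sorted(str)
--     result = []
--     stack = [("", 0)]
--     while stack:
--         slate, n = stack.pop()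
--         result.append(slate)
--         children = []
--         seen = set()
--         for index in range(n, len(str)):
--             ch = str[index]
--             if ch not in seen:
--                 seen.add(ch)
--                 children.append((slate + ch, index + 1))
--         stack.extend(reversed(children))
--     return result
-- ===== Notes on version B (the rewrite author's own statement) =====
-- stated objective: alternative
-- what changed: The recursive backtracking helper with a dict for per-level dedup is replaced by an explicit-stack pre-order DFS that collects each node's children into a list (dedup via a local set) and pushes them reversed, so the recursion disappears.
import Mathlib
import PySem

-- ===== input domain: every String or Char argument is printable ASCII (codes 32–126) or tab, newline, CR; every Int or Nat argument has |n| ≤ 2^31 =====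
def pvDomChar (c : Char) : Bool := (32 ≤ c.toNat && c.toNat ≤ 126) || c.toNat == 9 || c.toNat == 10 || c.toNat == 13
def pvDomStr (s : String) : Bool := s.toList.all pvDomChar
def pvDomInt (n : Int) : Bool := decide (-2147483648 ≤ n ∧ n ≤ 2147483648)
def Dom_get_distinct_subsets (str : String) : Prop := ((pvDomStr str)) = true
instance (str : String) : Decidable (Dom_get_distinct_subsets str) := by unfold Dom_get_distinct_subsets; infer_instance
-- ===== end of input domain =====

-- B replaces A's recursive backtracking helper by an explicit-stack pre-order DFS (same output, same cost): alternative decomposition.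
-- Python str slates are built with String.push (slate + str[index]); exact, since the appended value is a single char.
-- The Nat fuel parameters only make the recursions structural (the entry points supply provably sufficient fuel); they are not size limits.

-- ===== PORT A =====
mutual
-- helper(slate, n): appends slate, then recurses over the distinct next characters
def gdsHelperA (cs : List Char) (slate : String) (n : Nat) : Nat → List String
  | 0 => [slate]
  | fuel + 1 =>
      slate :: (if n = cs.length then [] else gdsLoopA cs slate n PySem.Dict.empty fuel)

-- the 'for index in range(n, len(str))' loop inside helper, with the 'unique' dict
def gdsLoopA (cs : List Char) (slate : String) (index : Nat) (unique : PySem.Dict Char Int) : Nat → List String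
  | 0 => []
  | fuel + 1 =>
      if index < cs.length then
        if unique.contains cs[index]! then gdsLoopA cs slate (index + 1) unique fuel
        else gdsHelperA cs (slate.push cs[index]!) (index + 1) fuel ++
             gdsLoopA cs slate (index + 1) (unique.insert cs[index]! 1) fuel
      else []
end

def get_distinct_subsets (str : String) : List String :=
  gdsHelperA (PySem.List.sorted str.toList (fun c => c) false) "" 0 (2 * str.toList.length + 1)

-- ===== PORT B =====
-- the child-collecting 'for index in range(n, len(str))' loop of Source B (children list + local 'seen' set); fuel = len - n, the exact trip count
def gdsChildrenB (cs : List Char) (slate : String) (index : Nat) (seen : PySem.Set Char) : Nat → List (String × Nat)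
  | 0 => []
  | fuel + 1 =>
      if index < cs.length then
        if PySem.Set.contains seen cs[index]! then gdsChildrenB cs slate (index + 1) seen fuel
        else (slate.push cs[index]!, index + 1) :: gdsChildrenB cs slate (index + 1) (PySem.Set.add seen cs[index]!) fuel
      else []

-- the 'while stack' loop of Source B; stack top at the head (Python pop() / extend(reversed(children)))
def gdsDfsB (cs : List Char) : Nat → List (String × Nat) → List String → List String
  | 0, _, acc => acc.reverse
  | fuel + 1, stack, acc =>
      match stack with
      | [] => acc.reverse
      | (slate, n) :: rest =>
          gdsDfsB cs fuel (gdsChildrenB cs slate n PySem.Set.empty (cs.length - n) ++ rest) (slate :: acc)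

def get_distinct_subsets_alt (str : String) : List String :=
  gdsDfsB (PySem.List.sorted str.toList (fun c => c) false) (2 ^ str.toList.length + 1) [("", 0)] []

-- ===== PRECONDITION & SPEC =====
def Spec_get_distinct_subsets (str : String) (out : List String) : Prop := out = get_distinct_subsets_alt str
instance (str : String) (out : List String) : Decidable (Spec_get_distinct_subsets str out) := by unfold Spec_get_distinct_subsets; infer_instance

-- ===== CLAIM (what is proved, stated in full; the proofs are below) =====
def Claim_equal_get_distinct_subsets : Prop := ∀ (str : String), Dom_get_distinct_subsets str → Spec_get_distinct_subsets str (get_distinct_subsets str)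

-- ===== LEMMAS AND PROOFS =====

-- Fuel-free (well-founded) versions of the four recursions, used only in the proofs.
mutual
def gdsHelperW (cs : List Char) (slate : String) (n : Nat) : List String :=
  slate :: (if n = cs.length then [] else gdsLoopW cs slate n PySem.Dict.empty)
  termination_by (2 * (cs.length - n) + 2)

def gdsLoopW (cs : List Char) (slate : String) (index : Nat) (unique : PySem.Dict Char Int) : List String :=
  if index < cs.length then
    if unique.contains cs[index]! then gdsLoopW cs slate (index + 1) unique
    else gdsHelperW cs (slate.push cs[index]!) (index + 1) ++
         gdsLoopW cs slate (index + 1) (unique.insert cs[index]! 1)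
  else []
  termination_by (2 * (cs.length - index) + 1)
  decreasing_by all_goals omega
end

def gdsChildrenW (cs : List Char) (slate : String) (index : Nat) (seen : PySem.Set Char) : List (String × Nat) :=
  if index < cs.length then
    if PySem.Set.contains seen cs[index]! then gdsChildrenW cs slate (index + 1) seen
    else (slate.push cs[index]!, index + 1) :: gdsChildrenW cs slate (index + 1) (PySem.Set.add seen cs[index]!)
  else []
  termination_by cs.length - index

def gdsWeight (len : Nat) (p : String × Nat) : Nat := 2 ^ (len - p.2)

-- the children of a node weigh strictly less than the node
theorem gds_children_weight (cs : List Char) (slate : String) (index : Nat) (seen : PySem.Set Char) :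
    ((gdsChildrenW cs slate index seen).map (gdsWeight cs.length)).sum ≤ 2 ^ (cs.length - index) - 1 := by
  fun_induction gdsChildrenW cs slate index seen with
  | case1 index seen h hc ih =>
      have h2 : (1:Nat) ≤ 2 ^ (cs.length - (index + 1)) := Nat.one_le_two_pow
      have : 2 ^ (cs.length - (index + 1)) + 2 ^ (cs.length - (index + 1)) = 2 ^ (cs.length - index) := by
        have : cs.length - index = (cs.length - (index + 1)) + 1 := by omega
        rw [this, pow_succ]; ring
      omega
  | case2 index seen h hc ih =>
      simp only [List.map_cons, List.sum_cons, gdsWeight]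
      have h2 : (1:Nat) ≤ 2 ^ (cs.length - (index + 1)) := Nat.one_le_two_pow
      have : 2 ^ (cs.length - (index + 1)) + 2 ^ (cs.length - (index + 1)) = 2 ^ (cs.length - index) := by
        have : cs.length - index = (cs.length - (index + 1)) + 1 := by omega
        rw [this, pow_succ]; ring
      omega
  | case3 index seen h => simp

def gdsDfsW (cs : List Char) (stack : List (String × Nat)) (acc : List String) : List String :=
  match stack with
  | [] => acc.reverse
  | (slate, n) :: rest =>
      gdsDfsW cs (gdsChildrenW cs slate n PySem.Set.empty ++ rest) (slate :: acc)
  termination_by (stack.map (gdsWeight cs.length)).sum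
  decreasing_by
    simp only [List.map_append, List.sum_append, List.map_cons, List.sum_cons]
    have h1 := gds_children_weight cs slate n PySem.Set.empty
    have h2 : (1:Nat) ≤ 2 ^ (cs.length - n) := Nat.one_le_two_pow
    simp only [gdsWeight]
    omega

-- with sufficient fuel the fueled A-ports compute the fuel-free versions
theorem gds_A_fuel (cs : List Char) (slate : String) : ∀ (f : Nat),
    (∀ (sl : String) (n : Nat), 2 * (cs.length - n) < f → gdsHelperA cs sl n f = gdsHelperW cs sl n) ∧
    (∀ (sl : String) (index : Nat) (unique : PySem.Dict Char Int), 2 * (cs.length - index) ≤ f →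
        gdsLoopA cs sl index unique f = gdsLoopW cs sl index unique) := by
  intro f
  induction f with
  | zero =>
      refine ⟨fun sl n h => absurd h (by omega), fun sl index unique h => ?_⟩
      rw [gdsLoopA, gdsLoopW]
      have hi : ¬ index < cs.length := by omega
      simp [hi]
  | succ f ih =>
      refine ⟨fun sl n h => ?_, fun sl index unique h => ?_⟩
      · rw [gdsHelperA, gdsHelperW]
        by_cases hn : n = cs.length
        · simp [hn]
        · simp only [hn, if_false]
          exact congrArg _ (ih.2 sl n PySem.Dict.empty (by omega))
      · rw [gdsLoopA, gdsLoopW]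
        by_cases hi : index < cs.length
        · simp only [hi, if_true]
          cases hc : unique.contains cs[index]! with
          | true =>
              simp only [hc, if_true]
              exact ih.2 sl (index + 1) unique (by omega)
          | false =>
              simp only [hc, Bool.false_eq_true, if_false]
              rw [ih.1 _ (index + 1) (by omega), ih.2 sl (index + 1) _ (by omega)]
        · simp [hi]

-- with fuel exactly len - index (what B's port supplies) the fueled child loop is the fuel-free one
theorem gds_childrenB_fuel (cs : List Char) (slate : String) : ∀ (f index : Nat), f = cs.length - index →
    ∀ (seen : PySem.Set Char), gdsChildrenB cs slate index seen f = gdsChildrenW cs slate index seen := by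
  intro f
  induction f with
  | zero =>
      intro index hf seen
      rw [gdsChildrenB, gdsChildrenW]
      have hi : ¬ index < cs.length := by omega
      simp [hi]
  | succ f ih =>
      intro index hf seen
      rw [gdsChildrenB, gdsChildrenW]
      have hi : index < cs.length := by omega
      simp only [hi, if_true]
      cases hc : PySem.Set.contains seen cs[index]! with
      | true =>
          simp only [hc, if_true]
          exact ih (index + 1) (by omega) seen
      | false =>
          simp only [hc, Bool.false_eq_true, if_false]
          rw [ih (index + 1) (by omega) _]

-- with fuel above the stack's total weight the fueled DFS loop is the fuel-free one
theorem gds_dfsB_fuel (cs : List Char) : ∀ (f : Nat) (stack : List (String × Nat)) (acc : List String),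
    (stack.map (gdsWeight cs.length)).sum < f → gdsDfsB cs f stack acc = gdsDfsW cs stack acc := by
  intro f
  induction f with
  | zero => intro stack acc h; omega
  | succ f ih =>
      intro stack acc h
      match stack with
      | [] => rw [gdsDfsB, gdsDfsW]
      | (slate, n) :: rest =>
          rw [gdsDfsB, gdsDfsW, gds_childrenB_fuel cs slate (cs.length - n) n rfl]
          refine ih _ _ ?_
          have h1 := gds_children_weight cs slate n PySem.Set.empty
          have h2 : (1:Nat) ≤ 2 ^ (cs.length - n) := Nat.one_le_two_pow
          simp only [List.map_append, List.sum_append, List.map_cons, List.sum_cons, gdsWeight] at h ⊢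
          omega

-- A's dict-driven loop equals B's child collection flat-mapped through the recursive helper,
-- as long as the dict's keys and the set hold the same characters.
theorem gds_loop_eq (cs : List Char) (slate : String) :
    ∀ (k index : Nat), cs.length - index ≤ k →
    ∀ (unique : PySem.Dict Char Int) (seen : PySem.Set Char),
      (∀ c, unique.contains c = PySem.Set.contains seen c) →
      gdsLoopW cs slate index unique
        = (gdsChildrenW cs slate index seen).flatMap (fun p => gdsHelperW cs p.1 p.2) := by
  intro k
  induction k with
  | zero =>
      intro index hk unique seen hs
      rw [gdsLoopW, gdsChildrenW]
      have hi : ¬ index < cs.length := by omega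
      simp [hi]
  | succ k ih =>
      intro index hk unique seen hs
      rw [gdsLoopW, gdsChildrenW]
      by_cases h : index < cs.length
      · simp only [h, if_true]
        rw [hs cs[index]!]
        cases hc : PySem.Set.contains seen cs[index]! with
        | true =>
            simp only [hc, if_true]
            exact ih (index + 1) (by omega) unique seen hs
        | false =>
            simp only [hc, Bool.false_eq_true, if_false, List.flatMap_cons]
            congr 1
            refine ih (index + 1) (by omega) _ _ ?_
            intro c
            rw [PySem.Dict.contains_insert]
            generalize hx : cs[index]! = x at hc ⊢
            simp only [PySem.Set.add, hc, Bool.false_eq_true, if_false]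
            by_cases hce : c = x
            · subst hce
              simp [PySem.Set.contains]
            · have hbe : (c == x) = false := by simp [hce]
              simp only [hbe, Bool.false_or, hs c]
              simp [PySem.Set.contains, hce]
      · simp [h]

-- one step of the recursion, phrased through B's children
theorem gds_helper_eq (cs : List Char) (slate : String) (n : Nat) :
    gdsHelperW cs slate n
      = slate :: (gdsChildrenW cs slate n PySem.Set.empty).flatMap (fun p => gdsHelperW cs p.1 p.2) := by
  rw [gdsHelperW]
  by_cases h : n = cs.length
  · rw [gdsChildrenW]
    have hn : ¬ n < cs.length := by omega
    simp [h, hn]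
  · simp only [h, if_false]
    congr 1
    refine gds_loop_eq cs slate (cs.length - n) n (le_refl _) _ _ ?_
    intro c
    simp [PySem.Dict.contains_empty, PySem.Set.contains, PySem.Set.empty]

-- the stack loop realises the pre-order traversal
theorem gds_dfs_eq (cs : List Char) (stack : List (String × Nat)) (acc : List String) :
    gdsDfsW cs stack acc = acc.reverse ++ stack.flatMap (fun p => gdsHelperW cs p.1 p.2) := by
  fun_induction gdsDfsW cs stack acc with
  | case1 acc => simp
  | case2 acc slate n rest ih =>
      rw [ih, List.flatMap_cons, gds_helper_eq cs slate n]
      simp [List.flatMap_append]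

-- ===== VERDICT (by name: the statement is the Claim_ definition above) =====
theorem get_distinct_subsets_spec : Claim_equal_get_distinct_subsets := by
  intro str _
  unfold Spec_get_distinct_subsets get_distinct_subsets get_distinct_subsets_alt
  have hlen : (PySem.List.sorted str.toList (fun c => c) false).length = str.toList.length :=
    PySem.List.length_sorted ..
  rw [(gds_A_fuel _ "" (2 * str.toList.length + 1)).1 "" 0 (by omega),
      gds_dfsB_fuel _ _ _ _ (by simp [gdsWeight, hlen]),
      gds_dfs_eq]
  simp
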